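-- pv_equiv track=rewrite | github.com/hyooeunn/Coding-Test | 프로그래머스/0/120812. 최빈값 구하기/최빈값 구하기.py | solution
-- ===== SOURCE A (Python) =====
-- def solution(array):
--     set_list = list(set(array))
--
--     num_count = [0] * len(set_list)
--
--     for i in range(len(set_list)):
--         num_count[i] = array.count(set_list[i])
--
--     mode_idx = num_count.index(max(num_count))
--
--     if num_count.count(max(num_count)) != 1:
--         answer = -1
--
--     else:
--         answer = set_list[mode_idx]
--
--     return answer
-- ===== SOURCE B (Python) =====
-- def solution(array):
--     s = sorted(array)
--     runs = []  # consecutive-equal runs of the sorted copy: (value, length)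
--     for x in s:
--         if runs and runs[-1][0] == x:
--             runs[-1] = (x, runs[-1][1] + 1)
--         else:
--             runs.append((x, 1))
--     best = max(c for _, c in runs)  # raises ValueError on empty input, like A
--     ties = 0
--     ans = -1
--     for v, c in runs:
--         if c == best:
--             ties += 1
--             ans = v
--     return ans if ties == 1 else -1
-- ===== Notes on version B (the rewrite author's own statement) =====
-- stated objective: faster
-- what changed: Replaces A's build-a-set-then-call-array.count-for-every-distinct-value-then-index scheme by sorting a copy and making one pass that groups consecutive equal elements into (value,length) runs, then taking the max run length and counting ties over the runs.
import Mathlib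
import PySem

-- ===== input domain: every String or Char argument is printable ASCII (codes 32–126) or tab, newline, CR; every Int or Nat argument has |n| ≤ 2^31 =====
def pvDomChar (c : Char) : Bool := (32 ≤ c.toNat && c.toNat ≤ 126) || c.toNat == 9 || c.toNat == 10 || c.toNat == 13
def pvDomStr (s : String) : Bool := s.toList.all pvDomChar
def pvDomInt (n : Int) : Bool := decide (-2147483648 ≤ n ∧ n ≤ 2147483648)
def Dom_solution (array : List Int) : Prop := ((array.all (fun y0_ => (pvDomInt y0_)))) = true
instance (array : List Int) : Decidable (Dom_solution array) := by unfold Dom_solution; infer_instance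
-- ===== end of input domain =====

-- B replaces A's count-every-distinct-value scheme by sort + one pass grouping consecutive equal runs (alternative algorithm); equivalence proved on nonempty inputs.

-- ===== PORT A =====
-- A iterates over list(set(array)); its result (the unique mode, or -1 on a tie) does not
-- depend on that iteration order, so set(array) is ported as PySem.Set.ofList.
def solution (array : List Int) : Int :=
  let set_list := PySem.Set.ofList array
  let num_count := set_list.map (fun v => (PySem.List.count array v : Int))
  match PySem.List.max? num_count (fun y => y) with
  | none => 0
  | some mx =>
    let mode_idx := (PySem.List.index? num_count mx).getD 0
    if PySem.List.count num_count mx ≠ 1 then -1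
    else (PySem.List.pyGet? set_list ((mode_idx : Nat) : Int)).getD 0

-- ===== PORT B =====
-- Source B appends runs at the back and inspects runs[-1]; the fold keeps the run list
-- reversed (head = last run) and reverses it at the end — same runs, same order.
def pvStep (acc : List (Int × Int)) (x : Int) : List (Int × Int) :=
  match acc with
  | (v, c) :: rest => if v = x then (v, c + 1) :: rest else (x, 1) :: (v, c) :: rest
  | [] => [(x, 1)]

def solution_alt (array : List Int) : Int :=
  let s := PySem.List.sorted array (fun y => y) false
  let runs := (s.foldl pvStep []).reverse
  match PySem.List.max? (runs.map (fun p => p.2)) (fun y => y) with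
  | none => 0
  | some best =>
    let r := runs.foldl (fun (p : Int × Int) vc => if vc.2 = best then (p.1 + 1, vc.1) else p) ((0 : Int), (-1 : Int))
    if r.1 = 1 then r.2 else -1

-- ===== PRECONDITION & SPEC =====
-- Pre_ excludes only the empty list, on which both A and B raise ValueError (max of an empty sequence).
def Pre_solution (array : List Int) : Prop := array ≠ []
instance (array : List Int) : Decidable (Pre_solution array) := by unfold Pre_solution; infer_instance
def pvWitness_solution : List Int := ([3, 1, 3])
def Spec_solution (array : List Int) (out : Int) : Prop := out = solution_alt array
instance (array : List Int) (out : Int) : Decidable (Spec_solution array out) := by unfold Spec_solution; infer_instance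

-- ===== CLAIM (what is proved, stated in full; the proofs are below) =====
def Claim_equal_solution : Prop := ∀ (array : List Int), Dom_solution array → Pre_solution array → Spec_solution array (solution array)

-- ===== LEMMAS AND PROOFS =====

def pvAddLeft (x : Int) (c : Int) : List (Int × Int) → List (Int × Int)
  | (v, c') :: t => if v = x then (v, c + c') :: t else (x, c) :: (v, c') :: t
  | [] => [(x, c)]

def pvGroup : List Int → List (Int × Int)
  | [] => []
  | x :: xs => pvAddLeft x 1 (pvGroup xs)

def pvEval (L : List (Int × Int)) : Int :=
  match PySem.List.max? (L.map (fun p => p.2)) (fun y => y) with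
  | none => 0
  | some mx =>
    if L.countP (fun p => p.2 == mx) ≠ 1 then -1
    else ((L.find? (fun p => p.2 == mx)).map (fun p => p.1)).getD 0

theorem pvStep_cons_append (s : List Int) : ∀ (a : Int × Int) (L : List (Int × Int)),
    List.foldl pvStep (a :: L) s = List.foldl pvStep [a] s ++ L := by
  induction s with
  | nil => intro a L; simp
  | cons y s' ih =>
    intro a L
    obtain ⟨v, c⟩ := a
    simp only [List.foldl_cons, pvStep]
    by_cases hv : v = y
    · rw [if_pos hv, if_pos hv]
      exact ih _ _
    · simp only [if_neg hv]
      rw [ih ⟨y,1⟩ ((v,c) :: L), ih ⟨y,1⟩ [(v,c)]]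
      simp

theorem pvAddLeft_addLeft (x c : Int) (g : List (Int × Int)) :
    pvAddLeft x c (pvAddLeft x 1 g) = pvAddLeft x (c + 1) g := by
  match g with
  | [] => simp [pvAddLeft]
  | (v, c') :: t =>
    by_cases hv : v = x
    · subst hv; simp [pvAddLeft]; ring
    · simp [pvAddLeft, hv]

theorem pvRevfold (s : List Int) : ∀ (x c : Int),
    (List.foldl pvStep [(x, c)] s).reverse = pvAddLeft x c (pvGroup s) := by
  induction s with
  | nil => intro x c; simp [pvAddLeft, pvGroup]
  | cons y s' ih =>
    intro x c
    simp only [List.foldl_cons, pvStep]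
    by_cases hv : x = y
    · subst hv
      rw [if_pos rfl]
      rw [ih]
      show _ = pvAddLeft x c (pvGroup (x :: s'))
      simp only [pvGroup]
      rw [pvAddLeft_addLeft]
    · simp only [if_neg hv]
      rw [pvStep_cons_append s' ⟨y,1⟩ [(x,c)]]
      rw [List.reverse_append]
      simp only [List.reverse_singleton, List.singleton_append]
      rw [ih]
      show _ = pvAddLeft x c (pvGroup (y :: s'))
      simp only [pvGroup]
      rcases hg : pvAddLeft y 1 (pvGroup s') with _ | ⟨⟨w, d⟩, t⟩
      · exfalso; cases h : pvGroup s' with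
        | nil => rw [h] at hg; simp [pvAddLeft] at hg
        | cons p t' => rw [h] at hg; obtain ⟨pv, pc⟩ := p; by_cases h2 : pv = y <;> simp [pvAddLeft, h2] at hg
      · have hw : w = y := by
          cases h : pvGroup s' with
          | nil => rw [h] at hg; simp [pvAddLeft] at hg; omega
          | cons p t' =>
            rw [h] at hg; obtain ⟨pv, pc⟩ := p
            by_cases h2 : pv = y
            · simp [pvAddLeft, h2] at hg; exact hg.1.1.symm
            · simp [pvAddLeft, h2] at hg; exact hg.1.1.symm
        subst hw
        have hxw : ¬ (w = x) := fun h2 => hv h2.symm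
        simp [pvAddLeft, hxw]

theorem pvFold_group (s : List Int) :
    (List.foldl pvStep [] s).reverse = pvGroup s := by
  cases s with
  | nil => simp [pvGroup]
  | cons x s' =>
    simp only [List.foldl_cons, pvStep, pvGroup]
    exact pvRevfold s' x 1

theorem pvAddLeft_fst (x c : Int) (g : List (Int × Int)) :
    ((pvAddLeft x c g).map Prod.fst = g.map Prod.fst ∧ x ∈ g.map Prod.fst) ∨
      (pvAddLeft x c g).map Prod.fst = x :: g.map Prod.fst := by
  match g with
  | [] => right; simp [pvAddLeft]
  | (v, c') :: t =>
    by_cases hv : v = x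
    · left; subst hv; simp [pvAddLeft]
    · right; simp [pvAddLeft, hv]

theorem pvMem_fst_group (s : List Int) (v : Int) :
    v ∈ (pvGroup s).map Prod.fst ↔ v ∈ s := by
  induction s with
  | nil => simp [pvGroup]
  | cons x s' ih =>
    simp only [pvGroup, List.mem_cons]
    rcases pvAddLeft_fst x 1 (pvGroup s') with ⟨he, hm⟩ | he <;> rw [he]
    · rw [ih]
      constructor
      · exact fun h => Or.inr h
      · rintro (h | h); · subst h; exact ih.mp hm
        · exact h
    · simp [ih]

theorem pvGroup_sorted_props (s : List Int) (hs : s.Pairwise (· ≤ ·)) :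
    ((pvGroup s).map Prod.fst).Pairwise (· < ·) ∧
      ∀ p ∈ pvGroup s, p.2 = (s.count p.1 : Int) := by
  induction s with
  | nil => simp [pvGroup]
  | cons x s' ih =>
    rw [List.pairwise_cons] at hs
    obtain ⟨hle, hs'⟩ := hs
    obtain ⟨hpw, hcnt⟩ := ih hs'
    simp only [pvGroup]
    rcases hg : pvGroup s' with _ | ⟨⟨v, c⟩, t⟩
    · constructor
      · simp [pvAddLeft]
      · intro p hp
        simp [pvAddLeft] at hp
        subst hp
        have : s' = [] := by
          by_contra hne
          rcases List.exists_mem_of_ne_nil _ hne with ⟨y, hy⟩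
          have : y ∈ (pvGroup s').map Prod.fst := (pvMem_fst_group s' y).mpr hy
          rw [hg] at this; simp at this
        subst this; simp
    · rw [hg] at hpw hcnt
      by_cases hv : v = x
      · subst hv
        rw [show pvAddLeft v 1 ((v, c) :: t) = (v, 1 + c) :: t by simp [pvAddLeft]]
        constructor
        · simpa using hpw
        · intro p hp
          rcases List.mem_cons.mp hp with h | h
          · subst h
            have := hcnt (v, c) (by simp)
            simp at this ⊢
            omega
          · have := hcnt p (List.mem_cons_of_mem _ h)
            have hne : p.1 ≠ v := by
              intro he
              simp at hpw
              have := hpw.1 p.1 p.2 h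
              omega
            rw [this]
            simp [List.count_cons]
            omega
      · rw [show pvAddLeft x 1 ((v, c) :: t) = (x, 1) :: (v, c) :: t by simp [pvAddLeft, hv]]
        have hxnotmem : x ∉ s' := by
          intro hx
          have hxg : x ∈ ((v, c) :: t).map Prod.fst := hg ▸ (pvMem_fst_group s' x).mpr hx
          have hvmem : v ∈ s' := (pvMem_fst_group s' v).mp (by rw [hg]; simp)
          have hxv : x ≤ v := hle v hvmem
          simp at hxg
          rcases hxg with h | ⟨cx, h⟩
          · exact hv h.symm
          · simp at hpw
            have : v < x := hpw.1 x cx h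
            omega
        constructor
        · rw [List.map_cons, List.pairwise_cons]
          refine ⟨?_, hpw⟩
          intro y hy
          have hymem : y ∈ s' := (pvMem_fst_group s' y).mp (by rw [hg]; exact hy)
          have := hle y hymem
          have : x ≠ y := fun he => hxnotmem (he ▸ hymem)
          omega
        · intro p hp
          rcases List.mem_cons.mp hp with h | h
          · subst h
            simp
            exact List.count_eq_zero_of_not_mem hxnotmem
          · have := hcnt p h
            have hpm : p.1 ∈ s' := (pvMem_fst_group s' p.1).mp (by rw [hg]; exact List.mem_map_of_mem h)
            have hne : p.1 ≠ x := fun he => hxnotmem (he ▸ hpm)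
            rw [this]
            simp [List.count_cons]
            omega

theorem pvPick_eq (l : List Int) (f : Int → Int) (y : Int) (h : y ∈ l.map f) :
    (PySem.List.pyGet? l ((((PySem.List.index? (l.map f) y).getD 0 : Nat)) : Int)).getD 0
      = (((l.map (fun v => (v, f v))).find? (fun p => p.2 == y)).map (fun p => p.1)).getD 0 := by
  induction l with
  | nil => simp at h
  | cons x t ih =>
    by_cases hx : f x = y
    · subst hx
      rw [List.map_cons, PySem.List.index?_cons_self]
      simp [PySem.List.pyGet?, PySem.List.pyIdx?]
    · have hmem : y ∈ t.map f := by
        simp only [List.map_cons, List.mem_cons] at h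
        rcases h with h1 | h1
        · exact absurd h1.symm hx
        · exact h1
      rw [List.map_cons, PySem.List.index?_cons_of_ne _ hx]
      rcases ho : PySem.List.index? (t.map f) y with _ | k
      · rw [PySem.List.index?_eq_none_iff] at ho; exact absurd hmem ho
      · simp only [ho, Option.map_some, Option.getD_some]
        rw [show (((k + 1 : Nat) : Int)) = ((k : Int) + 1) by push_cast; ring]
        rw [PySem.List.pyGet?_cons_succ]
        rw [ho] at ih
        simp only [Option.getD_some] at ih
        rw [ih hmem]
        simp [List.find?_cons, hx]

theorem pvFoldB_pair (best : Int) (L : List (Int × Int)) : ∀ (t a : Int),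
    L.foldl (fun (p : Int × Int) vc => if vc.2 = best then (p.1 + 1, vc.1) else p) (t, a)
      = (t + (L.countP (fun p => p.2 == best) : Int),
         L.foldl (fun acc vc => if vc.2 = best then vc.1 else acc) a) := by
  induction L with
  | nil => intro t a; simp
  | cons q L' ih =>
    intro t a
    by_cases hq : q.2 = best
    · simp only [List.foldl_cons, if_pos hq, ih, List.countP_cons, hq]
      simp
      push_cast
      ring_nf
    · simp only [List.foldl_cons, if_neg hq, ih, List.countP_cons]
      simp [hq]

theorem pvNoMatch_foldl (best a : Int) (L : List (Int × Int))
    (h : ∀ p ∈ L, ¬ (p.2 = best)) :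
    L.foldl (fun acc vc => if vc.2 = best then vc.1 else acc) a = a := by
  induction L generalizing a with
  | nil => rfl
  | cons q L' ih =>
    rw [List.foldl_cons, if_neg (h q (by simp))]
    exact ih _ (fun p hp => h p (List.mem_cons_of_mem _ hp))

theorem pvLastD_of_filter_singleton (best : Int) (L : List (Int × Int)) (q : Int × Int)
    (h : L.filter (fun p => p.2 == best) = [q]) (a : Int) :
    L.foldl (fun acc vc => if vc.2 = best then vc.1 else acc) a = q.1 := by
  induction L generalizing a with
  | nil => simp at h
  | cons r L' ih =>
    by_cases hr : r.2 = best
    · rw [List.filter_cons_of_pos (by simpa using hr)] at h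
      have hrq : r = q := (List.cons_eq_cons.mp h).1
      have hnil : L'.filter (fun p => p.2 == best) = [] := (List.cons_eq_cons.mp h).2
      rw [List.foldl_cons, if_pos hr, hrq]
      exact pvNoMatch_foldl best q.1 L' (by
        intro p hp hpb
        have : p ∈ L'.filter (fun p => p.2 == best) := List.mem_filter.mpr ⟨hp, by simpa using hpb⟩
        rw [hnil] at this; simp at this)
    · rw [List.filter_cons_of_neg (by simpa using hr)] at h
      rw [List.foldl_cons, if_neg hr]
      exact ih h a

theorem pvFind?_of_filter_singleton {α : Type} (p : α → Bool) (L : List α) (q : α)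
    (h : L.filter p = [q]) : L.find? p = some q := by
  induction L with
  | nil => simp at h
  | cons r L' ih =>
    by_cases hr : p r
    · rw [List.filter_cons_of_pos hr] at h
      rw [List.find?_cons_of_pos hr, (List.cons_eq_cons.mp h).1]
    · rw [List.filter_cons_of_neg (by simpa using hr)] at h
      rw [List.find?_cons_of_neg (by simpa using hr)]
      exact ih h

theorem pvMax?_perm (l1 l2 : List Int) (h : l1.Perm l2) :
    PySem.List.max? l1 (fun y => y) = PySem.List.max? l2 (fun y => y) := by
  rcases h1 : PySem.List.max? l1 (fun y => y) with _ | m1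
  · have e1 : l1 = [] := (PySem.List.max?_eq_none_iff _ _).mp h1
    have e2 : l2 = [] := List.nil_perm.mp (e1 ▸ h)
    rw [e2]
    rfl
  · rcases h2 : PySem.List.max? l2 (fun y => y) with _ | m2
    · have e2 : l2 = [] := (PySem.List.max?_eq_none_iff _ _).mp h2
      have e1 : l1 = [] := List.perm_nil.mp (e2 ▸ h)
      rw [e1] at h1
      simp [PySem.List.max?] at h1
    · have m1m : m1 ∈ l2 := h.mem_iff.mp (PySem.List.max?_mem h1)
      have m2m : m2 ∈ l1 := h.mem_iff.mpr (PySem.List.max?_mem h2)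
      have le1 := PySem.List.max?_isMax h1 m2 m2m
      have le2 := PySem.List.max?_isMax h2 m1 m1m
      simp only [] at le1 le2
      exact congrArg some (le_antisymm le2 le1)

theorem pvUnique_filter {α : Type} (p : α → Bool) (L1 L2 : List α) (h : L1.Perm L2)
    (q1 q2 : α) (h1 : L1.filter p = [q1]) (h2 : L2.filter p = [q2]) : q1 = q2 := by
  have hq1 : q1 ∈ L1.filter p := by rw [h1]; simp
  have hm : q1 ∈ L1 := (List.mem_filter.mp hq1).1
  have hp : p q1 := (List.mem_filter.mp hq1).2
  have : q1 ∈ L2.filter p := List.mem_filter.mpr ⟨h.mem_iff.mp hm, hp⟩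
  rw [h2] at this
  simpa using this

theorem pvEval_perm (L1 L2 : List (Int × Int)) (h : L1.Perm L2) :
    pvEval L1 = pvEval L2 := by
  unfold pvEval
  rw [pvMax?_perm _ _ (h.map _)]
  rcases hm : PySem.List.max? (L2.map (fun p => p.2)) (fun y => y) with _ | mx
  case none => rw [hm]
  case some =>
    rw [hm]
    simp only []
    rw [h.countP_eq]
    by_cases hc : L2.countP (fun p => p.2 == mx) = 1
    · rw [if_neg (by omega), if_neg (by omega)]
      have hc1 : L1.countP (fun p => p.2 == mx) = 1 := by rw [h.countP_eq]; exact hc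
      rw [List.countP_eq_length_filter] at hc hc1
      obtain ⟨q2, hq2⟩ := List.length_eq_one_iff.mp hc
      obtain ⟨q1, hq1⟩ := List.length_eq_one_iff.mp hc1
      rw [pvFind?_of_filter_singleton _ _ _ hq1, pvFind?_of_filter_singleton _ _ _ hq2,
        pvUnique_filter _ _ _ h _ _ hq1 hq2]
    · rw [if_pos (by omega), if_pos (by omega)]

theorem pvA_eq_eval (array : List Int) :
    solution array = pvEval ((PySem.Set.ofList array).map (fun v => (v, (PySem.List.count array v : Int)))) := by
  unfold solution pvEval
  simp only []
  have hmap : ((PySem.Set.ofList array).map (fun v => (v, (PySem.List.count array v : Int)))).map (fun p => p.2)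
      = (PySem.Set.ofList array).map (fun v => (PySem.List.count array v : Int)) := by
    rw [List.map_map]
    rfl
  rw [hmap]
  rcases hm : PySem.List.max? ((PySem.Set.ofList array).map (fun v => (PySem.List.count array v : Int))) (fun y => y) with _ | mx
  case none => rfl
  case some =>
    simp only []
    have hcnt : PySem.List.count ((PySem.Set.ofList array).map (fun v => (PySem.List.count array v : Int))) mx
        = ((PySem.Set.ofList array).map (fun v => (v, (PySem.List.count array v : Int)))).countP (fun p => p.2 == mx) := by
      rw [PySem.List.count_eq, List.count_eq_countP, List.countP_map, List.countP_map]
      exact List.countP_congr (fun x _ => Iff.rfl)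
    rw [hcnt]
    by_cases hc : ((PySem.Set.ofList array).map (fun v => (v, (PySem.List.count array v : Int)))).countP (fun p => p.2 == mx) = 1
    · rw [if_neg (by omega), if_neg (by omega)]
      exact pvPick_eq _ _ _ (PySem.List.max?_mem hm)
    · rw [if_pos (by omega), if_pos (by omega)]

theorem pvB_eq_eval (array : List Int) :
    solution_alt array = pvEval (pvGroup (PySem.List.sorted array (fun y => y) false)) := by
  unfold solution_alt pvEval
  simp only []
  rw [pvFold_group]
  rcases hm : PySem.List.max? ((pvGroup (PySem.List.sorted array (fun y => y) false)).map (fun p => p.2)) (fun y => y) with _ | best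
  case none => rw [hm]
  case some =>
    rw [hm]
    simp only []
    rw [pvFoldB_pair]
    simp only [zero_add]
    by_cases hc : (pvGroup (PySem.List.sorted array (fun y => y) false)).countP (fun p => p.2 == best) = 1
    · rw [if_pos (by omega), if_neg (by omega)]
      rw [List.countP_eq_length_filter] at hc
      obtain ⟨q, hq⟩ := List.length_eq_one_iff.mp hc
      rw [pvLastD_of_filter_singleton _ _ _ hq, pvFind?_of_filter_singleton _ _ _ hq]
      rfl
    · rw [if_neg (by omega), if_pos (by omega)]

theorem pvMain (array : List Int) : solution array = solution_alt array := by
  rw [pvA_eq_eval, pvB_eq_eval]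
  set s := PySem.List.sorted array (fun y => y) false with hs
  have hperm_s : s.Perm array := PySem.List.sorted_perm array (fun y => y) false
  have hpair : s.Pairwise (· ≤ ·) := by
    have := PySem.List.sorted_pairwise array (fun y => y)
    simpa using this
  obtain ⟨hlt, hcnt⟩ := pvGroup_sorted_props s hpair
  have hnodupB : ((pvGroup s).map Prod.fst).Nodup := hlt.imp (fun h => ne_of_lt h)
  have hmemB : ∀ v, v ∈ (pvGroup s).map Prod.fst ↔ v ∈ array := by
    intro v; rw [pvMem_fst_group]; exact hperm_s.mem_iff
  have hpermfst : (PySem.Set.ofList array).Perm ((pvGroup s).map Prod.fst) := by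
    rw [List.perm_ext_iff_of_nodup (PySem.Set.nodup_ofList array) hnodupB]
    intro v
    rw [PySem.Set.mem_ofList, hmemB]
  have hB : ((pvGroup s).map Prod.fst).map (fun v => (v, (PySem.List.count array v : Int))) = pvGroup s := by
    rw [List.map_map]
    have : ∀ p ∈ pvGroup s, ((fun v => (v, (PySem.List.count array v : Int))) ∘ Prod.fst) p = p := by
      intro p hp
      have h1 := hcnt p hp
      have h2 : List.count p.1 s = List.count p.1 array := hperm_s.count_eq p.1
      simp only [Function.comp_apply]
      rw [show PySem.List.count array p.1 = List.count p.1 array from PySem.List.count_eq _ _]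
      rw [← h2]
      exact Prod.ext rfl h1.symm
    calc (pvGroup s).map ((fun v => (v, (PySem.List.count array v : Int))) ∘ Prod.fst)
        = (pvGroup s).map id := List.map_congr_left this
      _ = pvGroup s := List.map_id _
  exact pvEval_perm _ _ (hB ▸ hpermfst.map (fun v => (v, (PySem.List.count array v : Int))))

-- ===== VERDICT (by name: the statement is the Claim_ definition above) =====
theorem solution_spec : Claim_equal_solution := by
  intro array _ _
  exact pvMain array
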